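-- pv_equiv track=rewrite | github.com/yuxin101/skills | skills/newageinvestments25-byte/nai-weekly-retro/scripts/retrospective.py | format_unfinished
-- ===== SOURCE A (Python) =====
-- def format_unfinished(unfinished):
--     """Format the Unfinished Business section."""
--     if not unfinished:
--         return "*All threads appear resolved. Clean slate heading into next week.*"
--
--     lines = []
--     # Group by date
--     by_date = {}
--     for item in unfinished:
--         d = item.get('date', 'unknown')
--         if d not in by_date:
--             by_date[d] = []
--         by_date[d].append(item['text'])
--
--     for date in sorted(by_date.keys()):
--         lines.append(f"**From {date}:**")
--         for text in by_date[date][:5]: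
--             lines.append(f"  - {text}")
--         lines.append('')
--
--     return '\n'.join(lines).strip()
-- ===== SOURCE B (Python) =====
-- def format_unfinished(unfinished):
--     """Format the Unfinished Business section (sorted-distinct-dates + filter pass, no dict)."""
--     if not unfinished:
--         return "*All threads appear resolved. Clean slate heading into next week.*"
--
--     dates = sorted(set(item.get('date', 'unknown') for item in unfinished))
--     lines = []
--     for d in dates:
--         texts = [item['text'] for item in unfinished if item.get('date', 'unknown') == d]
--         lines.append(f"**From {d}:**")
--         lines.extend(f"  - {t}" for t in texts[:5])
--         lines.append('')
--     return '\n'.join(lines).strip()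
-- ===== Notes on version B (the rewrite author's own statement) =====
-- stated objective: alternative
-- what changed: Instead of building a date-keyed dict of accumulating lists and then walking its sorted keys, B sorts the distinct dates up front and re-scans the input with a filter per date, so no mutable grouping structure exists; it trades one pass plus a dict for one filter pass per distinct date.
import Mathlib
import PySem

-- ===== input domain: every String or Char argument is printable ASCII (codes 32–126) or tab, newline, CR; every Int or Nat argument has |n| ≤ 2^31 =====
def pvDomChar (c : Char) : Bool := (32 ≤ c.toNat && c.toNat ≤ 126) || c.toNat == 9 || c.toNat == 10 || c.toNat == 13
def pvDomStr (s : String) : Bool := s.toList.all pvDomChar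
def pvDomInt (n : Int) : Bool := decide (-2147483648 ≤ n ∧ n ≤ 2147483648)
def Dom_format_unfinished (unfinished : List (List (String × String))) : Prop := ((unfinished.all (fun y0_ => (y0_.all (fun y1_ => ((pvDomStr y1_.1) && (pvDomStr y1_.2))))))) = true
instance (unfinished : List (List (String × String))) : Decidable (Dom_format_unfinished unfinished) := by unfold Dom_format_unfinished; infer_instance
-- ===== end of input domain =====

-- B replaces A's date-keyed dict of accumulating lists by a sorted list of distinct dates
-- with a filter pass per date (objective: alternative decomposition, no speed claim).


-- item.get('date', 'unknown')  (an item is a Python dict)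
def pvDateOf (item : List (String × String)) : String :=
  (PySem.Dict.ofList item).getD "date" "unknown"

-- item['text']; Pre_ guarantees the key is present, so the default is never read
def pvTextOf (item : List (String × String)) : String :=
  (PySem.Dict.ofList item).getD "text" ""

-- ===== PORT A =====
def format_unfinished (unfinished : List (List (String × String))) : String :=
  if unfinished = [] then
    "*All threads appear resolved. Clean slate heading into next week.*"
  else
    -- by_date = {}; for item: if d not in by_date: by_date[d] = []; by_date[d].append(item['text'])
    let byDate : PySem.Dict String (List String) :=
      unfinished.foldl (fun bd item =>
        let d := pvDateOf item
        let bd1 := if bd.contains d then bd else bd.insert d ([] : List String)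
        bd1.insert d (bd1.getD d [] ++ [pvTextOf item])) PySem.Dict.empty
    -- for date in sorted(by_date.keys()): append header, first 5 texts, ''
    let lines : List String :=
      (PySem.List.sorted byDate.keys (fun x => x) false).foldl (fun lines date =>
        let lines := lines ++ ["**From " ++ date ++ ":**"]
        let lines := (PySem.List.slice (byDate.getD date []) none (some 5)).foldl
          (fun ls t => ls ++ ["  - " ++ t]) lines
        lines ++ [""]) []
    PySem.Str.strip (PySem.Str.join "\n" lines)

-- ===== PORT B =====
def format_unfinished_alt (unfinished : List (List (String × String))) : String :=
  if unfinished = [] then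
    "*All threads appear resolved. Clean slate heading into next week.*"
  else
    -- dates = sorted(set(item.get('date','unknown') for item in unfinished))
    let dates : List String :=
      PySem.List.sorted (PySem.Set.ofList (unfinished.map pvDateOf)) (fun x => x) false
    -- for d in dates: texts = [item['text'] for item in unfinished if date == d]; emit block
    let lines : List String :=
      dates.foldl (fun lines d =>
        let texts := (unfinished.filter (fun it => pvDateOf it == d)).map pvTextOf
        lines ++ (["**From " ++ d ++ ":**"]
          ++ (PySem.List.slice texts none (some 5)).map (fun t => "  - " ++ t) ++ [""])) []
    PySem.Str.strip (PySem.Str.join "\n" lines)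

-- ===== PRECONDITION & SPEC =====
-- Pre_ excludes exactly the inputs where A raises KeyError: an item without a 'text' key
-- (B raises there too).
def Pre_format_unfinished (unfinished : List (List (String × String))) : Prop :=
  ∀ item ∈ unfinished, (PySem.Dict.ofList item).contains "text" = true
instance (unfinished : List (List (String × String))) : Decidable (Pre_format_unfinished unfinished) := by unfold Pre_format_unfinished; infer_instance

def pvWitness_format_unfinished : (List (List (String × String))) :=
  [[("date", "2024-01-05"), ("text", "follow up on review")],
   [("text", "close the loop")]]

def Spec_format_unfinished (unfinished : List (List (String × String))) (out : String) : Prop := out = format_unfinished_alt unfinished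
instance (unfinished : List (List (String × String))) (out : String) : Decidable (Spec_format_unfinished unfinished out) := by unfold Spec_format_unfinished; infer_instance

-- ===== CLAIM (what is proved, stated in full; the proofs are below) =====
def Claim_equal_format_unfinished : Prop := ∀ (unfinished : List (List (String × String))), Dom_format_unfinished unfinished → Pre_format_unfinished unfinished → Spec_format_unfinished unfinished (format_unfinished unfinished)

-- ===== LEMMAS AND PROOFS =====

-- A's loop body (ensure-key-then-append) is exactly Dict.modify with default [].
theorem pvStep_eq_modify (bd : PySem.Dict String (List String))
    (d t : String) :
    (let bd1 := if bd.contains d then bd else bd.insert d ([] : List String)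
     bd1.insert d (bd1.getD d [] ++ [t])) = bd.modify d [] (· ++ [t]) := by
  by_cases h : bd.contains d = true
  · simp [h, PySem.Dict.modify]
  · simp only [Bool.not_eq_true] at h
    simp [h, PySem.Dict.modify, PySem.Dict.insert_insert_self,
      PySem.Dict.getD_insert_self, PySem.Dict.getD_of_not_contains bd [] h]

theorem pvByDate_eq_modify_fold (unfinished : List (List (String × String))) :
    unfinished.foldl (fun bd item =>
        let d := pvDateOf item
        let bd1 := if bd.contains d then bd else bd.insert d ([] : List String)
        bd1.insert d (bd1.getD d [] ++ [pvTextOf item])) PySem.Dict.empty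
      = unfinished.foldl (fun bd item =>
          bd.modify (pvDateOf item) [] (· ++ [pvTextOf item])) PySem.Dict.empty := by
  exact PySem.List.foldl_congr_mem _ _ _ _ (fun bd item _ => pvStep_eq_modify bd (pvDateOf item) (pvTextOf item))

-- The grouped value at any date is the filtered text list B builds.
theorem pvByDate_getD (unfinished : List (List (String × String))) (d : String) :
    (unfinished.foldl (fun bd item =>
        bd.modify (pvDateOf item) [] (· ++ [pvTextOf item])) PySem.Dict.empty).getD d []
      = (unfinished.filter (fun it => pvDateOf it == d)).map pvTextOf := by
  have h := PySem.Dict.getD_foldl_modify_append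
    (unfinished.map (fun it => (pvDateOf it, pvTextOf it))) (PySem.Dict.empty) d
  rw [List.foldl_map] at h
  simpa [List.filter_map, Function.comp, List.map_map] using h

-- The dict's keys are the distinct dates in first-occurrence order, i.e. B's set.
theorem pvByDate_keys (unfinished : List (List (String × String))) :
    (unfinished.foldl (fun bd item =>
        bd.modify (pvDateOf item) [] (· ++ [pvTextOf item])) PySem.Dict.empty).keys
      = PySem.Set.ofList (unfinished.map pvDateOf) := by
  rw [PySem.Dict.keys_foldl_modify_key unfinished pvDateOf []
    (fun _ item v => v ++ [pvTextOf item]) PySem.Dict.empty]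
  rw [PySem.Dict.keys_empty, PySem.Set.ofList_eq_foldl, PySem.Set.update]

-- ===== VERDICT (by name: the statement is the Claim_ definition above) =====
theorem format_unfinished_spec : Claim_equal_format_unfinished := by
  intro unfinished _ _
  unfold Spec_format_unfinished format_unfinished format_unfinished_alt
  by_cases hnil : unfinished = []
  · simp [hnil]
  · simp only [hnil, ite_false]
    rw [pvByDate_eq_modify_fold, pvByDate_keys]
    congr 2
    refine PySem.List.foldl_congr_mem _ _ _ _ (fun lines d _ => ?_)
    rw [pvByDate_getD, PySem.List.foldl_append_singleton_eq_map]
    simp [List.append_assoc]
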